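-- pv_equiv track=rewrite | github.com/austral-prog/tp-7-MartiNogueira | loops_and_print.py | enumerate_list
-- ===== SOURCE A (Python) =====
-- def enumerate_list(strings):
--     result = []
--     count = 0
--     for index, color in enumerate(strings):
--         if color:  # Solo toma los valores que no están vacíos
--             result.append(f"{count}. {color}")
--             count += 1  # Incrementa el contador solo para los strings no vacíos
--     return result
-- ===== SOURCE B (Python) =====
-- def enumerate_list(strings):
--     n = sum(1 for s in strings if s)
--     out = []
--     for s in reversed(strings):
--         if s:
--             n -= 1
--             out.append(f"{n}. {s}")
--     out.reverse()
--     return out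
-- ===== Notes on version B (the rewrite author's own statement) =====
-- stated objective: alternative
-- what changed: Instead of a single forward loop threading an incrementing counter, B first computes the total number of truthy strings, then traverses the list in reverse building the output back-to-front with a decreasing counter, and finally reverses the output.
import Mathlib
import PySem

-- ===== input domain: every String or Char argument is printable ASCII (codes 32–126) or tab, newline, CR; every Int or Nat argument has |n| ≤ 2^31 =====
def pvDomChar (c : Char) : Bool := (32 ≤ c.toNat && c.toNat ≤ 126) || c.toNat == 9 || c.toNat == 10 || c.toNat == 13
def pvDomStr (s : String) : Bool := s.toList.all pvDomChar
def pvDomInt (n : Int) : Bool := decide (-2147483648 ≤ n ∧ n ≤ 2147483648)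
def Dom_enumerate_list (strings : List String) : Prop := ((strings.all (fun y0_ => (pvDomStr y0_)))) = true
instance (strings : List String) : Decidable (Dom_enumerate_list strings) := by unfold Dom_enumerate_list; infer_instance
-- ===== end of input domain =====

-- B builds the output back-to-front: it counts the truthy strings first, then walks the
-- list in reverse assigning decreasing numbers and reverses the result; objective: alternative.

-- ===== PORT A =====
-- loop state: (result, count); 'if color' = non-empty string
def enumerate_list (strings : List String) : List String :=
  (strings.foldl
    (fun (st : List String × Int) color =>
      if color ≠ "" then
        (st.1 ++ [PySem.Int.toStr st.2 ++ ". " ++ color], st.2 + 1)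
      else st)
    ([], 0)).1

-- ===== PORT B =====
-- n = sum(1 for s in strings if s); then reverse loop with state (n, out); then out.reverse()
def enumerate_list_alt (strings : List String) : List String :=
  let n : Int := strings.foldl (fun a s => if s ≠ "" then a + 1 else a) 0
  let st := strings.reverse.foldl
    (fun (st : Int × List String) s =>
      if s ≠ "" then (st.1 - 1, st.2 ++ [PySem.Int.toStr (st.1 - 1) ++ ". " ++ s])
      else st)
    (n, [])
  st.2.reverse

-- ===== PRECONDITION & SPEC =====
def Spec_enumerate_list (strings : List String) (out : List String) : Prop := out = enumerate_list_alt strings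
instance (strings : List String) (out : List String) : Decidable (Spec_enumerate_list strings out) := by unfold Spec_enumerate_list; infer_instance

-- ===== CLAIM =====
def Claim_equal_enumerate_list : Prop := ∀ (strings : List String), Dom_enumerate_list strings → Spec_enumerate_list strings (enumerate_list strings)

-- ===== LEMMAS AND PROOFS =====

-- proof helper: the labels A produces starting at number c (forward, ascending)
def pvUp (l : List String) (c : Int) : List String :=
  match l with
  | [] => []
  | s :: t => if s ≠ "" then (PySem.Int.toStr c ++ ". " ++ s) :: pvUp t (c + 1) else pvUp t c

-- proof helper: the labels B's reverse loop produces starting at number c (descending)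
def pvDown (l : List String) (c : Int) : List String :=
  match l with
  | [] => []
  | s :: t => if s ≠ "" then (PySem.Int.toStr (c - 1) ++ ". " ++ s) :: pvDown t (c - 1) else pvDown t c

-- proof helper: number of truthy strings
def pvCnt (l : List String) : Int :=
  match l with
  | [] => 0
  | s :: t => (if s ≠ "" then 1 else 0) + pvCnt t

theorem pvCnt_foldl (l : List String) (a : Int) :
    l.foldl (fun a s => if s ≠ "" then a + 1 else a) a = a + pvCnt l := by
  induction l generalizing a with
  | nil => simp [pvCnt]
  | cons x t ih =>
    rw [List.foldl_cons]
    by_cases hx : x = ""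
    · rw [if_neg (not_not_intro hx), ih]
      simp [pvCnt, hx]
    · rw [if_pos hx, ih]
      simp [pvCnt, hx]
      ring

theorem pvCnt_append (a b : List String) : pvCnt (a ++ b) = pvCnt a + pvCnt b := by
  induction a with
  | nil => simp [pvCnt]
  | cons x t ih =>
    by_cases hx : x = "" <;> simp [pvCnt, hx, ih] <;> ring

theorem pvCnt_reverse (l : List String) : pvCnt l.reverse = pvCnt l := by
  induction l with
  | nil => rfl
  | cons x t ih =>
    rw [List.reverse_cons, pvCnt_append, ih]
    by_cases hx : x = "" <;> simp [pvCnt, hx] <;> ring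

-- A's loop, generalized over accumulated result and running count, computes pvUp.
theorem enumerate_list_loop (l : List String) (acc : List String) (c : Int) :
    (l.foldl
      (fun (st : List String × Int) color =>
        if color ≠ "" then
          (st.1 ++ [PySem.Int.toStr st.2 ++ ". " ++ color], st.2 + 1)
        else st)
      (acc, c)).1
    = acc ++ pvUp l c := by
  induction l generalizing acc c with
  | nil => simp [pvUp]
  | cons x t ih =>
    simp only [ne_eq, ite_not] at ih
    by_cases hx : x = "" <;> simp [hx, List.foldl_cons, ih, pvUp]

-- B's reverse loop, generalized, computes pvDown.
theorem enumerate_list_alt_loop (l : List String) (acc : List String) (c : Int) :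
    l.foldl
      (fun (st : Int × List String) s =>
        if s ≠ "" then (st.1 - 1, st.2 ++ [PySem.Int.toStr (st.1 - 1) ++ ". " ++ s])
        else st)
      (c, acc)
    = (c - pvCnt l, acc ++ pvDown l c) := by
  induction l generalizing acc c with
  | nil => simp [pvDown, pvCnt]
  | cons x t ih =>
    simp only [ne_eq, ite_not] at ih
    by_cases hx : x = "" <;>
      simp [hx, List.foldl_cons, ih, pvDown, pvCnt] <;> ring_nf

theorem pvDown_append (a b : List String) (c : Int) :
    pvDown (a ++ b) c = pvDown a c ++ pvDown b (c - pvCnt a) := by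
  induction a generalizing c with
  | nil => simp [pvDown, pvCnt]
  | cons x t ih =>
    by_cases hx : x = "" <;> simp [hx, pvDown, pvCnt, ih] <;> ring_nf

theorem pvDown_reverse (l : List String) (c : Int) :
    (pvDown l.reverse c).reverse = pvUp l (c - pvCnt l) := by
  induction l generalizing c with
  | nil => simp [pvDown, pvUp, pvCnt]
  | cons x t ih =>
    rw [List.reverse_cons, pvDown_append, List.reverse_append, ih, pvCnt_reverse]
    by_cases hx : x = "" <;>
      simp [hx, pvDown, pvUp, pvCnt] <;> ring_nf <;> exact ⟨trivial, trivial⟩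

-- ===== VERDICT =====
theorem enumerate_list_spec : Claim_equal_enumerate_list := by
  intro strings _
  unfold Spec_enumerate_list enumerate_list enumerate_list_alt
  rw [enumerate_list_loop strings [] 0]
  simp only [pvCnt_foldl, enumerate_list_alt_loop, zero_add]
  have h := pvDown_reverse strings (pvCnt strings)
  simp only [sub_self] at h
  simp [h]
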